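-- pv_equiv track=rewrite | github.com/dnp1508-prog/Musk-mod-0 | Módulo 3. Programación orientada a objetos/Ejercicios resueltos modulo 3/Ejercicios módulo 3.py | __asistencias
-- ===== SOURCE A (Python) =====
-- def __asistencias(mes_número):
--     resultados = []
--     for mes, asistencia in mes_número.items():
--         if asistencia < 4:
--             resultados.append(1)
--         elif 4 <= asistencia < 8:
--             resultados.append(2)
--         else:
--             resultados.append(3)
--     return min(resultados)
-- ===== SOURCE B (Python) =====
-- def __asistencias(mes_número):
--     m = min(mes_número.values())
--     return 1 if m < 4 else 2 if m < 8 else 3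
-- ===== Notes on version B (the rewrite author's own statement) =====
-- stated objective: simpler
-- what changed: Instead of building a list of per-month categories and taking its minimum, B takes the minimum attendance value once and classifies only that value (the classification is monotone, so the two agree).
import Mathlib
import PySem

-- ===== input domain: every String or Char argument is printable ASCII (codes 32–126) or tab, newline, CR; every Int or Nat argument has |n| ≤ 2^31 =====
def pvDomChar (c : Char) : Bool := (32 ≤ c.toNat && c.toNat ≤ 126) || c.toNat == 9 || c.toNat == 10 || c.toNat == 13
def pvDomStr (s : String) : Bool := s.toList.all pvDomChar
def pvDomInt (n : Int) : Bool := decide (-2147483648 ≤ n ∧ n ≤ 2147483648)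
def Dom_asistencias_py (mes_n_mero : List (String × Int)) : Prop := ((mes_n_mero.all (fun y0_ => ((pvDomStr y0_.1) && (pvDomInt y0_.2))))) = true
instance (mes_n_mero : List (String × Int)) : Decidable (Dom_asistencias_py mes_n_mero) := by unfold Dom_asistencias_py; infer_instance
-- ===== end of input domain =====

-- B classifies the single minimum attendance value instead of building the list of all categories; simpler, same cost.
-- Pre_ excludes the empty dict, on which A raises ValueError (min of an empty list).


-- ===== PORT A =====
def asistencias_py (mes_n_mero : List (String × Int)) : Int :=
  let d := PySem.Dict.ofList mes_n_mero
  let resultados : List Int :=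
    d.items.foldl (fun acc p =>
      if p.2 < 4 then acc ++ [1]
      else if 4 ≤ p.2 ∧ p.2 < 8 then acc ++ [2]
      else acc ++ [3]) []
  match PySem.List.min? resultados (fun x => x) with
  | some m => m
  | none => 0   -- unreachable under Pre_ (Python raises ValueError here)

-- ===== PORT B =====
def asistencias_py_alt (mes_n_mero : List (String × Int)) : Int :=
  let d := PySem.Dict.ofList mes_n_mero
  match PySem.List.min? d.values (fun x => x) with
  | some m => if m < 4 then 1 else if m < 8 then 2 else 3
  | none => 0   -- unreachable under Pre_

-- ===== PRECONDITION & SPEC =====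
-- A (and B) raise ValueError (min of an empty sequence) on the empty dict; Pre_ excludes it.
def Pre_asistencias_py (mes_n_mero : List (String × Int)) : Prop := mes_n_mero ≠ []
instance (mes_n_mero : List (String × Int)) : Decidable (Pre_asistencias_py mes_n_mero) := by unfold Pre_asistencias_py; infer_instance
def pvWitness_asistencias_py : (List (String × Int)) := [("enero", 5)]

def Spec_asistencias_py (mes_n_mero : List (String × Int)) (out : Int) : Prop := out = asistencias_py_alt mes_n_mero
instance (mes_n_mero : List (String × Int)) (out : Int) : Decidable (Spec_asistencias_py mes_n_mero out) := by unfold Spec_asistencias_py; infer_instance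

-- ===== CLAIM (what is proved, stated in full; the proofs are below) =====
def Claim_equal_asistencias_py : Prop := ∀ (mes_n_mero : List (String × Int)), Dom_asistencias_py mes_n_mero → Pre_asistencias_py mes_n_mero → Spec_asistencias_py mes_n_mero (asistencias_py mes_n_mero)

-- ===== LEMMAS AND PROOFS =====
def pvClassify (a : Int) : Int :=
  if a < 4 then 1 else if 4 ≤ a ∧ a < 8 then 2 else 3

lemma pvClassify_min (a b : Int) : pvClassify (min a b) = min (pvClassify a) (pvClassify b) := by
  unfold pvClassify
  rcases le_total a b with h | h <;> simp [min_def] <;> split_ifs <;> omega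

lemma pvFoldl_min_map (t : List Int) (v : Int) :
    (t.map pvClassify).foldl min (pvClassify v) = pvClassify (t.foldl min v) := by
  induction t generalizing v with
  | nil => rfl
  | cons x s ih => simp [List.foldl, ← pvClassify_min, ih]

lemma pvResultados_eq (l : List (String × Int)) :
    l.foldl (fun acc (p : String × Int) =>
      if p.2 < 4 then acc ++ [(1 : Int)]
      else if 4 ≤ p.2 ∧ p.2 < 8 then acc ++ [2]
      else acc ++ [3]) [] = (l.map (·.2)).map pvClassify := by
  have : ∀ acc, l.foldl (fun acc (p : String × Int) =>
      if p.2 < 4 then acc ++ [(1 : Int)]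
      else if 4 ≤ p.2 ∧ p.2 < 8 then acc ++ [2]
      else acc ++ [3]) acc = acc ++ (l.map (·.2)).map pvClassify := by
    induction l with
    | nil => simp
    | cons x t ih =>
      intro acc
      simp only [List.foldl, List.map]
      rw [ih]
      split_ifs <;> simp [pvClassify, *]
  simpa using this []

lemma pvClassify_eq_B (m : Int) :
    pvClassify m = if m < 4 then 1 else if m < 8 then 2 else 3 := by
  unfold pvClassify; split_ifs <;> omega

-- ===== VERDICT (by name: the statement is the Claim_ definition above) =====
theorem asistencias_py_spec : Claim_equal_asistencias_py := by
  intro l _ hpre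
  unfold Spec_asistencias_py asistencias_py asistencias_py_alt
  simp only []
  have hitems : (PySem.Dict.ofList l).items ≠ [] := by
    cases l with
    | nil => exact absurd rfl hpre
    | cons x t =>
      intro h
      have hk : (PySem.Dict.ofList (x :: t)).keys =
          PySem.Set.ofList ((x :: t).map (·.1)) := by
        have h1 : PySem.Dict.ofList (x :: t) =
            (x :: t).foldl (fun d p => d.insert p.1 p.2) PySem.Dict.empty := rfl
        rw [h1, PySem.Dict.keys_foldl_insert_key, PySem.Dict.keys_empty,
          PySem.Set.update_nil_left]
      have hx : x.1 ∈ (PySem.Dict.ofList (x :: t)).keys := by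
        rw [hk]; simp [PySem.Set.mem_ofList]
      have hkeys : (PySem.Dict.ofList (x :: t)).keys =
          (PySem.Dict.ofList (x :: t)).items.map (·.1) := rfl
      rw [hkeys, h] at hx; simp at hx
  rw [pvResultados_eq]
  have hvals : (PySem.Dict.ofList l).values = (PySem.Dict.ofList l).items.map (·.2) := rfl
  cases hI : (PySem.Dict.ofList l).items with
  | nil => exact absurd hI hitems
  | cons p t =>
    rw [hvals, hI]
    simp only [List.map]
    rw [PySem.List.min?_id_cons, PySem.List.min?_id_cons]
    rw [pvFoldl_min_map (t.map (·.2)) p.2, pvClassify_eq_B]
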